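-- pv_equiv track=rewrite | github.com/alekoza02/pomoshnik | GRAFICA/_modulo_elementi_grafici.py | check_for_diff
-- ===== SOURCE A (Python) =====
-- def check_for_diff(list1, list2):
--
--     elemento_vecchio = None
--     elemento_nuovo = None
--
--     for index, state1, state2 in zip(range(len(list1)), list1, list2):
--         if state1 != state2:
--             elemento_nuovo = index
--
--         if state1 == state2 and state1 == 1:
--             elemento_vecchio = index
--
--     return elemento_vecchio, elemento_nuovo
-- ===== SOURCE B (Python) =====
-- def check_for_diff(list1, list2):
--     n = min(len(list1), len(list2))
--     elemento_vecchio = None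
--     elemento_nuovo = None
--     for i in range(n - 1, -1, -1):
--         if elemento_nuovo is None and list1[i] != list2[i]:
--             elemento_nuovo = i
--         if elemento_vecchio is None and list1[i] == list2[i] == 1:
--             elemento_vecchio = i
--         if elemento_vecchio is not None and elemento_nuovo is not None:
--             break
--     return elemento_vecchio, elemento_nuovo
-- ===== Notes on version B (the rewrite author's own statement) =====
-- stated objective: alternative
-- what changed: B scans backward from the end with short-circuit: it records the first (from the end) mismatch index and the first both-equal-1 index and breaks once both are found, instead of A's full forward pass that overwrites both trackers on every hit.
import Mathlib
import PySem

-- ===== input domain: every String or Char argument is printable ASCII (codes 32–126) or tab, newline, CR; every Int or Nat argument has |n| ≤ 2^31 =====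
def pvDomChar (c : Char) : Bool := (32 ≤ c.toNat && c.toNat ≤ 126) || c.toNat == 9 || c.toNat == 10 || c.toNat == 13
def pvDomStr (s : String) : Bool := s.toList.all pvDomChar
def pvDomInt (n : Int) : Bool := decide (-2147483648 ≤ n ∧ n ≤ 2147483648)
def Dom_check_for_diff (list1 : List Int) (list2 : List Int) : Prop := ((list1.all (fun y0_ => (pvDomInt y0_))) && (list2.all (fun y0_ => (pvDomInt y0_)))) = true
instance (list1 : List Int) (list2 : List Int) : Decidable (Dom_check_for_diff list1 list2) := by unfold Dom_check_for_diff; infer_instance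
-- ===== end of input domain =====

-- B replaces A's full forward overwrite scan by a backward scan that stops as soon as both indices are found (alternative decomposition, same asymptotic cost).


-- ===== PORT A =====
-- one step of A's for-loop: p = ((state1, state2), index)
def pvStepA (st : Option Int × Option Int) (p : (Int × Int) × Nat) : Option Int × Option Int :=
  let nuovo := if p.1.1 ≠ p.1.2 then some (p.2 : Int) else st.2
  let vecchio := if p.1.1 = p.1.2 ∧ p.1.1 = 1 then some (p.2 : Int) else st.1
  (vecchio, nuovo)

def check_for_diff (list1 : List Int) (list2 : List Int) : Option Int × Option Int :=
  ((list1.zip list2).zipIdx).foldl pvStepA (none, none)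

-- ===== PORT B =====
-- B's backward loop: the reversed indexed zip is the sequence of (list1[i], list2[i]) for i = n-1 … 0;
-- the guarded updates and the break ("return early once both set") are as in Source B.
def pvGoB : List ((Int × Int) × Nat) → Option Int → Option Int → Option Int × Option Int
  | [], v, nu => (v, nu)
  | p :: rest, v, nu =>
    let nu' := if nu = none ∧ p.1.1 ≠ p.1.2 then some (p.2 : Int) else nu
    let v' := if v = none ∧ p.1.1 = p.1.2 ∧ p.1.1 = 1 then some (p.2 : Int) else v
    if v' ≠ none ∧ nu' ≠ none then (v', nu') else pvGoB rest v' nu'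

def check_for_diff_alt (list1 : List Int) (list2 : List Int) : Option Int × Option Int :=
  pvGoB ((list1.zip list2).zipIdx).reverse none none

-- ===== PRECONDITION & SPEC =====
def Spec_check_for_diff (list1 : List Int) (list2 : List Int) (out : Option Int × Option Int) : Prop := out = check_for_diff_alt list1 list2
instance (list1 : List Int) (list2 : List Int) (out : Option Int × Option Int) : Decidable (Spec_check_for_diff list1 list2 out) := by unfold Spec_check_for_diff; infer_instance

-- ===== CLAIM (what is proved, stated in full; the proofs are below) =====
def Claim_equal_check_for_diff : Prop := ∀ (list1 : List Int) (list2 : List Int), Dom_check_for_diff list1 list2 → Spec_check_for_diff list1 list2 (check_for_diff list1 list2)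

-- ===== LEMMAS AND PROOFS =====
def pvIsM (p : (Int × Int) × Nat) : Bool := p.1.1 == p.1.2 && p.1.1 == 1
def pvIsD (p : (Int × Int) × Nat) : Bool := p.1.1 != p.1.2
def pvIdx (p : (Int × Int) × Nat) : Int := (p.2 : Int)

theorem pvFoldA (z : List ((Int × Int) × Nat)) : ∀ (v nu : Option Int),
    z.foldl pvStepA (v, nu)
      = (((z.reverse.find? pvIsM).map pvIdx).orElse (fun _ => v),
         ((z.reverse.find? pvIsD).map pvIdx).orElse (fun _ => nu)) := by
  induction z with
  | nil => intro v nu; simp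
  | cons p z ih =>
    intro v nu
    have h := ih (pvStepA (v, nu) p).1 (pvStepA (v, nu) p).2
    simp only [List.foldl_cons, h, List.reverse_cons, List.find?_append]
    simp only [Prod.mk.injEq]
    constructor
    · by_cases hm : p.1.1 = p.1.2 ∧ p.1.1 = 1
      · have h2 : p.1.2 = 1 := hm.1 ▸ hm.2
        simp [pvStepA, pvIsM, pvIdx, hm, h2]
        cases (z.reverse.find? pvIsM) <;> rfl
      · simp [pvStepA, pvIsM, hm]
    · by_cases hd : p.1.1 = p.1.2 <;>
        simp [pvStepA, pvIsD, pvIdx, hd] <;>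
        cases (z.reverse.find? pvIsD) <;> simp [pvIdx]

theorem pvGoBeq (q : List ((Int × Int) × Nat)) : ∀ (v nu : Option Int),
    pvGoB q v nu
      = (v.orElse (fun _ => (q.find? pvIsM).map pvIdx),
         nu.orElse (fun _ => (q.find? pvIsD).map pvIdx)) := by
  induction q with
  | nil => intro v nu; cases v <;> cases nu <;> simp [pvGoB]
  | cons p q ih =>
    intro v nu
    simp only [pvGoB]
    by_cases hm : p.1.1 = p.1.2 ∧ p.1.1 = 1
    · have hd : p.1.1 = p.1.2 := hm.1
      have h2 : p.1.2 = 1 := hm.1 ▸ hm.2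
      cases v <;> cases nu <;> simp [ih, pvIsM, pvIsD, pvIdx, hm, hd, h2]
    · by_cases hd : p.1.1 = p.1.2
      · have h2 : ¬ p.1.2 = 1 := fun hh => hm ⟨hd, hd ▸ hh⟩
        cases v <;> cases nu <;> simp [ih, pvIsM, pvIsD, pvIdx, hm, hd, h2]
      · cases v <;> cases nu <;> simp [ih, pvIsM, pvIsD, pvIdx, hm, hd]

-- ===== VERDICT (by name: the statement is the Claim_ definition above) =====
theorem check_for_diff_spec : Claim_equal_check_for_diff := by
  intro list1 list2 _
  unfold Spec_check_for_diff check_for_diff check_for_diff_alt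
  rw [pvFoldA, pvGoBeq]
  cases h1 : (((list1.zip list2).zipIdx).reverse.find? pvIsM) <;>
    cases h2 : (((list1.zip list2).zipIdx).reverse.find? pvIsD) <;>
    simp
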